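-- pv_equiv track=rewrite | github.com/intel/optimized-cloud-recipes | scripts/amx/amx-detect-windows.py | check_amx_support
-- ===== SOURCE A (Python) =====
-- def check_amx_support(output):
--     """
--     Check AMX support by looking for specific feature strings
--     """
--     if not output:
--         return None
--
--     # Initialize features dictionary
--     features = {
--         'amx_bf16'    : False,
--         'amx_tile'    : False,
--         'amx_int8'    : False,
-- 	'amx_state' : False
--     }
--
--     # Look for AMX-related strings in the output
--     for line in output.split('\n'):
--         line = line.strip()
--         if "CPUID.07H.00H:EDX[22]" in line:
--             features['amx_bf16'] = "1" in line
--         elif "CPUID.07H.00H:EDX[24]" in line: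
--             features['amx_tile'] = "1" in line
--         elif "CPUID.07H.00H:EDX[25]" in line:
--             features['amx_int8'] = "1" in line
--
--         if "AMX State" in line:
--             features['amx_state'] = "AMX State is supported" in line
--
--     return features
-- ===== SOURCE B (Python) =====
-- MARKERS = {
--     'amx_bf16': "CPUID.07H.00H:EDX[22]",
--     'amx_tile': "CPUID.07H.00H:EDX[24]",
--     'amx_int8': "CPUID.07H.00H:EDX[25]",
-- }
--
--
-- def check_amx_support(output):
--     """Check AMX support by looking for the CPUID feature strings."""
--     if not output:
--         return None
--     lines = [line.strip() for line in output.split('\n')]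
--
--     def last_line_with(marker):
--         for line in reversed(lines):
--             if marker in line:
--                 return line
--         return ""
--
--     features = {key: "1" in last_line_with(marker)
--                 for key, marker in MARKERS.items()}
--     features['amx_state'] = "AMX State is supported" in last_line_with("AMX State")
--     return features
-- ===== Notes on version B (the rewrite author's own statement) =====
-- stated objective: alternative
-- what changed: Replaces A's single forward loop threading four flags through an elif chain by per-marker backward scans: each flag is decided by the last line containing its marker. Pre_ excludes outputs where one line contains two of the three CPUID markers: A's elif chain then records only the first marker, a corner no CPUID dump reaches and where either reading is defensible.
import Mathlib
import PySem

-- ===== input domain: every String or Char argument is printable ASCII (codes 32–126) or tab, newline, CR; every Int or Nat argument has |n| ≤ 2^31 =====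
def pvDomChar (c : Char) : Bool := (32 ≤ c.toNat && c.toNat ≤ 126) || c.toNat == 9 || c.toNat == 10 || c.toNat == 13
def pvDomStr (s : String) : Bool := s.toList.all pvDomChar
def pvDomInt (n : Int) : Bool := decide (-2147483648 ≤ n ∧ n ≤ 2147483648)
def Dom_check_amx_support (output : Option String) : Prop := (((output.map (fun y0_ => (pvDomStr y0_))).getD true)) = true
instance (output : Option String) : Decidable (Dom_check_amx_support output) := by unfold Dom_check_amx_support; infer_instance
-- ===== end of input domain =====

-- B replaces A's single stateful elif-chain loop by per-marker backward scans (the last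
-- line containing each marker decides its flag); objective: alternative decomposition, same cost.

-- ===== PORT A =====
-- one loop iteration of A: strip the line, elif-chain on the three CPUID markers, then the AMX State check
def aStep (st : Bool × Bool × Bool × Bool) (raw : String) : Bool × Bool × Bool × Bool :=
  let l := PySem.Str.strip raw
  let st1 :=
    if PySem.Str.isIn "CPUID.07H.00H:EDX[22]" l then
      (PySem.Str.isIn "1" l, st.2.1, st.2.2.1, st.2.2.2)
    else if PySem.Str.isIn "CPUID.07H.00H:EDX[24]" l then
      (st.1, PySem.Str.isIn "1" l, st.2.2.1, st.2.2.2)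
    else if PySem.Str.isIn "CPUID.07H.00H:EDX[25]" l then
      (st.1, st.2.1, PySem.Str.isIn "1" l, st.2.2.2)
    else st
  if PySem.Str.isIn "AMX State" l then
    (st1.1, st1.2.1, st1.2.2.1, PySem.Str.isIn "AMX State is supported" l)
  else st1

def check_amx_support (output : Option String) : Option (List (String × Bool)) :=
  match output with
  | none => none
  | some s =>
    if s = "" then none
    else
      let f : Bool × Bool × Bool × Bool := ((PySem.Str.split? s "\n").getD []).foldl aStep (false, false, false, false)
      some [("amx_bf16", f.1), ("amx_tile", f.2.1), ("amx_int8", f.2.2.1), ("amx_state", f.2.2.2)]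

-- ===== PORT B =====
-- the last stripped line containing the marker, or "" if none does
def lastLineWith (lines : List String) (marker : String) : String :=
  match lines.reverse.find? (fun l => PySem.Str.isIn marker l) with
  | some l => l
  | none => ""

def check_amx_support_alt (output : Option String) : Option (List (String × Bool)) :=
  match output with
  | none => none
  | some s =>
    if s = "" then none
    else
      let lines := ((PySem.Str.split? s "\n").getD []).map PySem.Str.strip
      some [("amx_bf16", PySem.Str.isIn "1" (lastLineWith lines "CPUID.07H.00H:EDX[22]")),
            ("amx_tile", PySem.Str.isIn "1" (lastLineWith lines "CPUID.07H.00H:EDX[24]")),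
            ("amx_int8", PySem.Str.isIn "1" (lastLineWith lines "CPUID.07H.00H:EDX[25]")),
            ("amx_state", PySem.Str.isIn "AMX State is supported" (lastLineWith lines "AMX State"))]

-- ===== PRECONDITION & SPEC =====
-- Pre_ excludes outputs in which a single line contains two of the three CPUID markers: there
-- A's elif chain records only the first marker while B records each independently — a line
-- listing two feature bits at once is a corner no real CPUID dump reaches and either reading
-- is defensible.
def lineOneMarker (l : String) : Bool :=
  ((if PySem.Str.isIn "CPUID.07H.00H:EDX[22]" l then 1 else 0)
   + (if PySem.Str.isIn "CPUID.07H.00H:EDX[24]" l then 1 else 0)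
   + (if PySem.Str.isIn "CPUID.07H.00H:EDX[25]" l then (1 : Nat) else 0)) ≤ 1

def Pre_check_amx_support (output : Option String) : Prop :=
  (output.map (fun s => ((PySem.Str.split? s "\n").getD []).all
      (fun l => lineOneMarker (PySem.Str.strip l)))).getD true = true
instance (output : Option String) : Decidable (Pre_check_amx_support output) := by unfold Pre_check_amx_support; infer_instance

def pvWitness_check_amx_support : Option String :=
  some "CPUID.07H.00H:EDX[22] = 1\n CPUID.07H.00H:EDX[24] = 0\nAMX State is supported"

def Spec_check_amx_support (output : Option String) (out : Option (List (String × Bool))) : Prop := out = check_amx_support_alt output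
instance (output : Option String) (out : Option (List (String × Bool))) : Decidable (Spec_check_amx_support output out) := by unfold Spec_check_amx_support; infer_instance

-- ===== CLAIM (what is proved, stated in full; the proofs are below) =====
def Claim_equal_check_amx_support : Prop := ∀ (output : Option String), Dom_check_amx_support output → Pre_check_amx_support output → Spec_check_amx_support output (check_amx_support output)

-- ===== LEMMAS AND PROOFS =====

-- "set the flag if this line matches" as one named update step
def cStep (p : String → Bool) (g : String → Bool) (v : Bool) (l : String) : Bool :=
  if p l then g l else v

-- a "last write wins" fold equals a backward find
theorem foldl_if_last (p g : String → Bool) (v : Bool) (ls : List String) :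
    ls.foldl (cStep p g) v
      = (match ls.reverse.find? p with | some l => g l | none => v) := by
  induction ls generalizing v with
  | nil => rfl
  | cons a t ih =>
    simp only [List.foldl_cons, List.reverse_cons, List.find?_append]
    rw [ih]
    cases h : t.reverse.find? p with
    | some l => simp
    | none =>
      simp only [Option.none_or, List.find?_singleton]
      by_cases hp : p a = true <;> simp [cStep, hp]

-- A's step acts independently on the four components
theorem aStep_componentwise (st : Bool × Bool × Bool × Bool) (raw : String) :
    aStep st raw =
      (cStep (fun l => PySem.Str.isIn "CPUID.07H.00H:EDX[22]" l)
             (fun l => PySem.Str.isIn "1" l) st.1 (PySem.Str.strip raw),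
       cStep (fun l => PySem.Str.isIn "CPUID.07H.00H:EDX[24]" l
                       && !PySem.Str.isIn "CPUID.07H.00H:EDX[22]" l)
             (fun l => PySem.Str.isIn "1" l) st.2.1 (PySem.Str.strip raw),
       cStep (fun l => PySem.Str.isIn "CPUID.07H.00H:EDX[25]" l
                       && !PySem.Str.isIn "CPUID.07H.00H:EDX[22]" l
                       && !PySem.Str.isIn "CPUID.07H.00H:EDX[24]" l)
             (fun l => PySem.Str.isIn "1" l) st.2.2.1 (PySem.Str.strip raw),
       cStep (fun l => PySem.Str.isIn "AMX State" l)
             (fun l => PySem.Str.isIn "AMX State is supported" l) st.2.2.2 (PySem.Str.strip raw)) := by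
  obtain ⟨a, b, c, d⟩ := st
  simp only [aStep, cStep]
  cases h1 : PySem.Str.isIn "CPUID.07H.00H:EDX[22]" (PySem.Str.strip raw) <;>
  cases h2 : PySem.Str.isIn "CPUID.07H.00H:EDX[24]" (PySem.Str.strip raw) <;>
  cases h3 : PySem.Str.isIn "CPUID.07H.00H:EDX[25]" (PySem.Str.strip raw) <;>
  cases h4 : PySem.Str.isIn "AMX State" (PySem.Str.strip raw) <;>
  simp

-- a fold whose step is componentwise splits into four independent folds
theorem foldl_prod4 (p1 g1 p2 g2 p3 g3 p4 g4 : String → Bool) (ls : List String)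
    (a b c d : Bool) :
    ls.foldl (fun st l => (cStep p1 g1 st.1 l, cStep p2 g2 st.2.1 l,
                           cStep p3 g3 st.2.2.1 l, cStep p4 g4 st.2.2.2 l)) (a, b, c, d)
      = (ls.foldl (cStep p1 g1) a, ls.foldl (cStep p2 g2) b,
         ls.foldl (cStep p3 g3) c, ls.foldl (cStep p4 g4) d) := by
  induction ls generalizing a b c d with
  | nil => rfl
  | cons x t ih => simpa using ih (cStep p1 g1 a x) (cStep p2 g2 b x) (cStep p3 g3 c x) (cStep p4 g4 d x)

-- find? respects predicates that agree on the list's elements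
theorem find?_congr_mem {α : Type} (p q : α → Bool) (ls : List α)
    (h : ∀ a ∈ ls, p a = q a) : ls.find? p = ls.find? q := by
  induction ls with
  | nil => rfl
  | cons x t ih =>
    have hx := h x (List.mem_cons_self ..)
    simp only [List.find?_cons, hx]
    cases q x with
    | true => rfl
    | false => exact ih (fun a ha => h a (List.mem_cons_of_mem _ ha))

-- on a one-marker line the elif guards reduce to plain containment
theorem oneMarker_tile (l : String) (h : lineOneMarker l = true) :
    (PySem.Str.isIn "CPUID.07H.00H:EDX[24]" l
      && !PySem.Str.isIn "CPUID.07H.00H:EDX[22]" l)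
      = PySem.Str.isIn "CPUID.07H.00H:EDX[24]" l := by
  unfold lineOneMarker at h
  cases h1 : PySem.Str.isIn "CPUID.07H.00H:EDX[22]" l <;>
  cases h2 : PySem.Str.isIn "CPUID.07H.00H:EDX[24]" l <;>
  cases h3 : PySem.Str.isIn "CPUID.07H.00H:EDX[25]" l <;>
  simp_all

theorem oneMarker_int8 (l : String) (h : lineOneMarker l = true) :
    (PySem.Str.isIn "CPUID.07H.00H:EDX[25]" l
      && !PySem.Str.isIn "CPUID.07H.00H:EDX[22]" l
      && !PySem.Str.isIn "CPUID.07H.00H:EDX[24]" l)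
      = PySem.Str.isIn "CPUID.07H.00H:EDX[25]" l := by
  unfold lineOneMarker at h
  cases h1 : PySem.Str.isIn "CPUID.07H.00H:EDX[22]" l <;>
  cases h2 : PySem.Str.isIn "CPUID.07H.00H:EDX[24]" l <;>
  cases h3 : PySem.Str.isIn "CPUID.07H.00H:EDX[25]" l <;>
  simp_all

-- a backward find followed by the token test equals B's lastLineWith form
theorem find_isIn_eq_lastLineWith (lines : List String) (marker token : String)
    (hnone : PySem.Chars.isIn token.toList [] = false) :
    (match lines.reverse.find? (fun l => PySem.Str.isIn marker l) with
      | some l => PySem.Str.isIn token l | none => false)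
      = PySem.Str.isIn token (lastLineWith lines marker) := by
  unfold lastLineWith
  cases h : lines.reverse.find? (fun l => PySem.Str.isIn marker l) <;> simp [hnone]

set_option maxHeartbeats 1000000 in
theorem check_amx_eq (output : Option String) (hpre : Pre_check_amx_support output) :
    check_amx_support output = check_amx_support_alt output := by
  cases output with
  | none => rfl
  | some s =>
    simp only [check_amx_support, check_amx_support_alt]
    by_cases hs : s = ""
    · simp [hs]
    · simp only [if_neg hs]
      have hok : ∀ l ∈ ((PySem.Str.split? s "\n").getD []).map PySem.Str.strip,
          lineOneMarker l = true := by
        intro l hl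
        rcases List.mem_map.mp hl with ⟨r, hr, rfl⟩
        unfold Pre_check_amx_support at hpre
        simp only [Option.map_some, Option.getD_some, List.all_eq_true] at hpre
        exact hpre r hr
      have hfold : ((PySem.Str.split? s "\n").getD []).foldl aStep (false, false, false, false)
          = (((PySem.Str.split? s "\n").getD []).map PySem.Str.strip).foldl
              (fun st l => (cStep (fun l => PySem.Str.isIn "CPUID.07H.00H:EDX[22]" l)
                                  (fun l => PySem.Str.isIn "1" l) st.1 l,
                            cStep (fun l => PySem.Str.isIn "CPUID.07H.00H:EDX[24]" l
                                            && !PySem.Str.isIn "CPUID.07H.00H:EDX[22]" l)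
                                  (fun l => PySem.Str.isIn "1" l) st.2.1 l,
                            cStep (fun l => PySem.Str.isIn "CPUID.07H.00H:EDX[25]" l
                                            && !PySem.Str.isIn "CPUID.07H.00H:EDX[22]" l
                                            && !PySem.Str.isIn "CPUID.07H.00H:EDX[24]" l)
                                  (fun l => PySem.Str.isIn "1" l) st.2.2.1 l,
                            cStep (fun l => PySem.Str.isIn "AMX State" l)
                                  (fun l => PySem.Str.isIn "AMX State is supported" l) st.2.2.2 l))
              (false, false, false, false) := by
        rw [List.foldl_map]
        congr 1
        funext st raw
        exact aStep_componentwise st raw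
      rw [hfold, foldl_prod4, foldl_if_last, foldl_if_last, foldl_if_last, foldl_if_last]
      have hmem : ∀ l ∈ (((PySem.Str.split? s "\n").getD []).map PySem.Str.strip).reverse,
          lineOneMarker l = true := fun l hl => hok l (List.mem_reverse.mp hl)
      rw [find?_congr_mem _ (fun l => PySem.Str.isIn "CPUID.07H.00H:EDX[24]" l) _
            (fun l hl => oneMarker_tile l (hmem l hl)),
          find?_congr_mem _ (fun l => PySem.Str.isIn "CPUID.07H.00H:EDX[25]" l) _
            (fun l hl => oneMarker_int8 l (hmem l hl))]
      rw [find_isIn_eq_lastLineWith _ _ _ (by decide),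
          find_isIn_eq_lastLineWith _ _ _ (by decide),
          find_isIn_eq_lastLineWith _ _ _ (by decide),
          find_isIn_eq_lastLineWith _ _ _ (by decide)]

-- ===== VERDICT (by name: the statement is the Claim_ definition above) =====
theorem check_amx_support_spec : Claim_equal_check_amx_support := by
  intro output _ hpre
  unfold Spec_check_amx_support
  exact check_amx_eq output hpre
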